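-- pv_equiv track=rewrite | github.com/nifki/nifki.net | new_server.py | is_valid_page_name
-- ===== SOURCE A (Python) =====
-- import string
--
-- def is_valid_page_name(pagename):
--     """
--     Page names must start with a letter, must contain only letters and
--     digits, must not be entirely capital letters, and must have at least three
--     characters and at most twenty.
--     """
--
--     def all_alphanumeric(s):
--         alphanumerics = string.ascii_letters + string.digits
--         return all(c in alphanumerics for c in s)
--
--     def all_uppercase(s):
--         return all(c in string.ascii_uppercase for c in s)
--
--     if not (3 <= len(pagename) <= 20): return False
--     if pagename[0] not in string.ascii_letters: return False
--     if not all_alphanumeric(pagename): return False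
--     if all_uppercase(pagename): return False
--     return True
-- ===== SOURCE B (Python) =====
-- def is_valid_page_name(pagename):
--     # Single pass with range comparisons instead of three membership scans.
--     if not (3 <= len(pagename) <= 20):
--         return False
--     c0 = pagename[0]
--     ok_first = 'a' <= c0 <= 'z' or 'A' <= c0 <= 'Z'
--     all_alnum = True
--     has_non_upper = False
--     for c in pagename:
--         if 'a' <= c <= 'z' or '0' <= c <= '9':
--             has_non_upper = True
--         elif not ('A' <= c <= 'Z'):
--             all_alnum = False
--     return ok_first and all_alnum and has_non_upper
-- ===== Notes on version B (the rewrite author's own statement) =====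
-- stated objective: alternative
-- what changed: Replaces A's three separate all()/membership scans over concatenated alphabet strings by one pass over the string with two boolean accumulators and constant-time character range comparisons.
import Mathlib
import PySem

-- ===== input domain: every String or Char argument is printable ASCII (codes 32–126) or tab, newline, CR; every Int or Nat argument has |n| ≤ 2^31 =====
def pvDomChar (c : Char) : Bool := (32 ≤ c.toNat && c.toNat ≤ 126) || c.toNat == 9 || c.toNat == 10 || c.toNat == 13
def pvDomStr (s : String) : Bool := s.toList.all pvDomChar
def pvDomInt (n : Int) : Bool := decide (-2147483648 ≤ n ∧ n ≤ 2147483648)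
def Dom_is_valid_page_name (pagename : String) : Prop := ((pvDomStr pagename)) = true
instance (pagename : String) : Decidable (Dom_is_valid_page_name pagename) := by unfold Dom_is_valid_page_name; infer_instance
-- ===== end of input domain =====

-- B replaces A's three all()/membership scans over alphabet strings by one pass with
-- two boolean accumulators and character range comparisons (objective: alternative).


-- ===== PORT A =====
-- string.ascii_letters / string.digits / string.ascii_uppercase as character lists
def pvAsciiLetters : List Char :=
  ['a', 'b', 'c', 'd', 'e', 'f', 'g', 'h', 'i', 'j', 'k', 'l', 'm', 'n', 'o', 'p', 'q', 'r', 's', 't', 'u', 'v', 'w', 'x', 'y', 'z', 'A', 'B', 'C', 'D', 'E', 'F', 'G', 'H', 'I', 'J', 'K', 'L', 'M', 'N', 'O', 'P', 'Q', 'R', 'S', 'T', 'U', 'V', 'W', 'X', 'Y', 'Z']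
def pvAsciiDigits : List Char :=
  ['0', '1', '2', '3', '4', '5', '6', '7', '8', '9']
def pvAsciiUppercase : List Char :=
  ['A', 'B', 'C', 'D', 'E', 'F', 'G', 'H', 'I', 'J', 'K', 'L', 'M', 'N', 'O', 'P', 'Q', 'R', 'S', 'T', 'U', 'V', 'W', 'X', 'Y', 'Z']

def pvAllAlphanumeric (s : List Char) : Bool :=
  s.all (fun c => (pvAsciiLetters ++ pvAsciiDigits).contains c)

def pvAllUppercase (s : List Char) : Bool :=
  s.all (fun c => pvAsciiUppercase.contains c)

def is_valid_page_name (pagename : String) : Bool :=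
  let cs := pagename.toList
  if ¬ (3 ≤ cs.length ∧ cs.length ≤ 20) then false
  else if ¬ pvAsciiLetters.contains ((PySem.List.pyGet? cs 0).getD ' ') then false
  else if ¬ pvAllAlphanumeric cs then false
  else if pvAllUppercase cs then false
  else true

-- ===== PORT B =====
-- the single pass of Source B: carries (all_alnum, has_non_upper)
def pvScan : List Char → Bool → Bool → Bool × Bool
  | [], alnum, nonup => (alnum, nonup)
  | c :: rest, alnum, nonup =>
    if ('a' ≤ c ∧ c ≤ 'z') ∨ ('0' ≤ c ∧ c ≤ '9') then pvScan rest alnum true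
    else if ¬ ('A' ≤ c ∧ c ≤ 'Z') then pvScan rest false nonup
    else pvScan rest alnum nonup

def is_valid_page_name_alt (pagename : String) : Bool :=
  let cs := pagename.toList
  if ¬ (3 ≤ cs.length ∧ cs.length ≤ 20) then false
  else
    let c0 := (PySem.List.pyGet? cs 0).getD ' '
    let okFirst : Bool := ('a' ≤ c0 ∧ c0 ≤ 'z') ∨ ('A' ≤ c0 ∧ c0 ≤ 'Z')
    let p := pvScan cs true false
    okFirst && p.1 && p.2

-- ===== PRECONDITION & SPEC =====
def Spec_is_valid_page_name (pagename : String) (out : Bool) : Prop := out = is_valid_page_name_alt pagename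
instance (pagename : String) (out : Bool) : Decidable (Spec_is_valid_page_name pagename out) := by unfold Spec_is_valid_page_name; infer_instance

-- ===== CLAIM (what is proved, stated in full; the proofs are below) =====
def Claim_equal_is_valid_page_name : Prop := ∀ (pagename : String), Dom_is_valid_page_name pagename → Spec_is_valid_page_name pagename (is_valid_page_name pagename)

-- ===== LEMMAS AND PROOFS =====

def pvIsLowDig (c : Char) : Bool := ('a' ≤ c ∧ c ≤ 'z') ∨ ('0' ≤ c ∧ c ≤ '9')
def pvIsUp (c : Char) : Bool := ('A' ≤ c ∧ c ≤ 'Z')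

lemma pv_char_eq_iff (c d : Char) : c = d ↔ c.toNat = d.toNat := by
  rw [Char.ext_iff, Char.toNat, Char.toNat, UInt32.toNat_inj]

lemma pv_char_le_iff (c d : Char) : c ≤ d ↔ c.toNat ≤ d.toNat := by
  rw [Char.le_def, Char.toNat, Char.toNat, ← UInt32.le_iff_toNat_le]

lemma pvScan_spec (cs : List Char) (a n : Bool) :
    pvScan cs a n = (a && cs.all (fun c => pvIsLowDig c || pvIsUp c),
                     n || cs.any pvIsLowDig) := by
  induction cs generalizing a n with
  | nil => simp [pvScan]
  | cons c rest ih =>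
    by_cases h1 : ('a' ≤ c ∧ c ≤ 'z') ∨ ('0' ≤ c ∧ c ≤ '9')
    · have hb : pvIsLowDig c = true := by simpa [pvIsLowDig] using h1
      simp [pvScan, h1, ih, hb]
    · have hb : pvIsLowDig c = false := by simpa [pvIsLowDig] using h1
      by_cases h2 : ('A' ≤ c ∧ c ≤ 'Z')
      · have hu : pvIsUp c = true := by simpa [pvIsUp] using h2
        simp [pvScan, h1, h2, ih, hb, hu]
      · have hu : pvIsUp c = false := by simpa [pvIsUp] using h2
        simp [pvScan, h1, h2, ih, hb, hu]


lemma pv_mem_letters' (c : Char) :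
    (pvAsciiLetters.contains c = true) ↔ (('a' ≤ c ∧ c ≤ 'z') ∨ ('A' ≤ c ∧ c ≤ 'Z')) := by
  simp only [pvAsciiLetters, List.contains_eq_mem, decide_eq_true_eq, List.mem_cons,
    List.not_mem_nil, or_false, pv_char_eq_iff, pv_char_le_iff, Char.reduceToNat]
  omega

lemma pv_mem_alnum' (c : Char) :
    ((pvAsciiLetters ++ pvAsciiDigits).contains c = true) ↔ (pvIsLowDig c || pvIsUp c) = true := by
  simp only [pvAsciiLetters, pvAsciiDigits, pvIsLowDig, pvIsUp, List.contains_eq_mem,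
    decide_eq_true_eq, List.mem_append, List.mem_cons, List.not_mem_nil, or_false,
    Bool.or_eq_true, pv_char_eq_iff, pv_char_le_iff, Char.reduceToNat]
  omega

lemma pv_mem_upper' (c : Char) :
    (pvAsciiUppercase.contains c = true) ↔ pvIsUp c = true := by
  simp only [pvAsciiUppercase, pvIsUp, List.contains_eq_mem, decide_eq_true_eq,
    List.mem_cons, List.not_mem_nil, or_false, pv_char_eq_iff, pv_char_le_iff, Char.reduceToNat]
  omega

lemma pv_lowdig_not_up (c : Char) (h : pvIsLowDig c = true) : pvIsUp c = false := by
  simp only [pvIsLowDig, pvIsUp, decide_eq_true_eq, decide_eq_false_iff_not,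
    pv_char_le_iff, Char.reduceToNat] at h ⊢
  omega

-- if every char is alphanumeric, "not all uppercase" = "some lowercase-or-digit"
lemma pv_alnum_not_upper (cs : List Char)
    (h : cs.all (fun c => pvIsLowDig c || pvIsUp c) = true) :
    (!cs.all pvIsUp) = cs.any pvIsLowDig := by
  induction cs with
  | nil => simp
  | cons c rest ih =>
    simp only [List.all_cons, Bool.and_eq_true] at h
    simp only [List.all_cons, List.any_cons, Bool.not_and, ih h.2]
    rcases Bool.or_eq_true_iff.mp h.1 with hl | hu
    · simp [hl, pv_lowdig_not_up c hl]
    · have hnl : pvIsLowDig c = false := by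
        by_contra hx
        have := pv_lowdig_not_up c (by revert hx; cases pvIsLowDig c <;> simp)
        rw [hu] at this; exact Bool.true_eq_false.mp this
      simp [hu, hnl]

-- ===== VERDICT (by name: the statement is the Claim_ definition above) =====
theorem is_valid_page_name_spec : Claim_equal_is_valid_page_name := by
  intro pagename _
  unfold Spec_is_valid_page_name is_valid_page_name is_valid_page_name_alt
  simp only [pvScan_spec, Bool.true_and, Bool.false_or]
  set cs := pagename.toList with hcs
  by_cases hlen : 3 ≤ cs.length ∧ cs.length ≤ 20
  · simp only [hlen]
    set c0 := (PySem.List.pyGet? cs 0).getD ' ' with hc0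
    by_cases hfirst : pvAsciiLetters.contains c0 = true
    · have hfirst' : (decide (('a' ≤ c0 ∧ c0 ≤ 'z') ∨ ('A' ≤ c0 ∧ c0 ≤ 'Z'))) = true := by
        rw [decide_eq_true_eq]; exact (pv_mem_letters' c0).mp hfirst
      simp only [hfirst, not_true_eq_false, if_false, hfirst', Bool.true_and]
      by_cases hal : pvAllAlphanumeric cs = true
      · have hal' : cs.all (fun c => pvIsLowDig c || pvIsUp c) = true := by
          simp only [pvAllAlphanumeric, List.all_eq_true] at hal ⊢
          intro c hc; exact (pv_mem_alnum' c).mp (hal c hc)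
        have hup : pvAllUppercase cs = cs.all pvIsUp := by
          rw [Bool.eq_iff_iff]
          simp only [pvAllUppercase, List.all_eq_true]
          exact ⟨fun h c hc => (pv_mem_upper' c).mp (h c hc),
                 fun h c hc => (pv_mem_upper' c).mpr (h c hc)⟩
        simp only [hal, not_true_eq_false, if_false, hal', hup]
        rw [← pv_alnum_not_upper cs hal']
        cases cs.all pvIsUp <;> simp
      · have hal2 : cs.all (fun c => pvIsLowDig c || pvIsUp c) = false := by
          cases hx : cs.all (fun c => pvIsLowDig c || pvIsUp c)
          · rfl
          · exfalso; apply hal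
            simp only [pvAllAlphanumeric, List.all_eq_true] at hx ⊢
            intro c hc; exact (pv_mem_alnum' c).mpr (hx c hc)
        simp [hal, hal2]
    · have hfirst' : (decide (('a' ≤ c0 ∧ c0 ≤ 'z') ∨ ('A' ≤ c0 ∧ c0 ≤ 'Z'))) = false := by
        rw [decide_eq_false_iff_not]
        intro hx
        exact hfirst ((pv_mem_letters' c0).mpr hx)
      simp only [hfirst', Bool.false_and]
      rw [if_pos hfirst]
  · simp [hlen]
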